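-- pv_equiv track=rewrite | github.com/Fergons/SentimentAnalysis | data/dataset.py | map_category_to_main_category
-- ===== SOURCE A (Python) =====
-- def map_category_to_main_category(category):
--     category_map = {
--         'gameplay': ['gameplay', 'game mode', 'story', 'level design',
--                      'multiplayer', 'violence', 'character design',
--                      'controls', 'tutorial', 'quality', 'gun play', 'gunplay', 'environment', 'gameplay mechanics',
--                      'world',
--                      'game environment', 'game design', 'difficulty', 'content', 'cosmetic content', 'in-game content',
--                      'options', 'user interface','UI', 'interface', 'gameplay', 'game modes', 'gameplay features', 'monetization'],
--         'price': ['price'],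
--         'audio_visuals': ['audio_visuals', 'visuals', 'sounds', 'game environment', 'game design', 'visual', 'sound',
--                           'audio_visuals', 'graphics', 'music', 'soundtrack', 'sound effects', 'audio'],
--         'performance_bugs': ['performance_bugs', 'bugs', 'performance', 'saves', 'developers', 'updates', 'anticheat',
--                              'update', 'patch', 'bug', 'crash', 'lag', 'performance', 'server', 'servers',
--                              'server issues', 'server performance'],
--         'community': ['languages', 'reviews', 'community', 'comparison'],
--         'overall': ['overall', 'genre', 'platform', 'game'],
--         'NULL': ['NULL', 'none', None, 'null', '', 'noterm']
--     }
--     for main_category, subcategories in category_map.items():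
--         if category in subcategories:
--             return main_category
--     return 'other'
-- ===== SOURCE B (Python) =====
-- # Inverted lookup table: subcategory -> main category, precomputed first-occurrence-wins
-- # from the original nested category_map (the duplicated 'game environment'/'game design'
-- # keep their 'gameplay' priority). None is handled explicitly; one dict lookup per call.
-- _SUB_TO_MAIN = {
--     'gameplay': 'gameplay',
--     'game mode': 'gameplay',
--     'story': 'gameplay',
--     'level design': 'gameplay',
--     'multiplayer': 'gameplay',
--     'violence': 'gameplay',
--     'character design': 'gameplay',
--     'controls': 'gameplay',
--     'tutorial': 'gameplay',
--     'quality': 'gameplay',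
--     'gun play': 'gameplay',
--     'gunplay': 'gameplay',
--     'environment': 'gameplay',
--     'gameplay mechanics': 'gameplay',
--     'world': 'gameplay',
--     'game environment': 'gameplay',
--     'game design': 'gameplay',
--     'difficulty': 'gameplay',
--     'content': 'gameplay',
--     'cosmetic content': 'gameplay',
--     'in-game content': 'gameplay',
--     'options': 'gameplay',
--     'user interface': 'gameplay',
--     'UI': 'gameplay',
--     'interface': 'gameplay',
--     'game modes': 'gameplay',
--     'gameplay features': 'gameplay',
--     'monetization': 'gameplay',
--     'price': 'price',
--     'audio_visuals': 'audio_visuals',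
--     'visuals': 'audio_visuals',
--     'sounds': 'audio_visuals',
--     'visual': 'audio_visuals',
--     'sound': 'audio_visuals',
--     'graphics': 'audio_visuals',
--     'music': 'audio_visuals',
--     'soundtrack': 'audio_visuals',
--     'sound effects': 'audio_visuals',
--     'audio': 'audio_visuals',
--     'performance_bugs': 'performance_bugs',
--     'bugs': 'performance_bugs',
--     'performance': 'performance_bugs',
--     'saves': 'performance_bugs',
--     'developers': 'performance_bugs',
--     'updates': 'performance_bugs',
--     'anticheat': 'performance_bugs',
--     'update': 'performance_bugs',
--     'patch': 'performance_bugs',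
--     'bug': 'performance_bugs',
--     'crash': 'performance_bugs',
--     'lag': 'performance_bugs',
--     'server': 'performance_bugs',
--     'servers': 'performance_bugs',
--     'server issues': 'performance_bugs',
--     'server performance': 'performance_bugs',
--     'languages': 'community',
--     'reviews': 'community',
--     'community': 'community',
--     'comparison': 'community',
--     'overall': 'overall',
--     'genre': 'overall',
--     'platform': 'overall',
--     'game': 'overall',
--     'NULL': 'NULL',
--     'none': 'NULL',
--     'null': 'NULL',
--     '': 'NULL',
--     'noterm': 'NULL'
-- }
--
--
-- def map_category_to_main_category(category):
--     if category is None: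
--         return 'NULL'
--     return _SUB_TO_MAIN.get(category, 'other')
-- ===== Notes on version B (the rewrite author's own statement) =====
-- stated objective: simpler
-- what changed: Replaces the per-call loop over the nested category_map's subcategory lists with a flat precomputed inverted dict (subcategory to main category, first occurrence wins) plus an explicit None branch, so the body is a single dict lookup with a default.
import Mathlib
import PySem

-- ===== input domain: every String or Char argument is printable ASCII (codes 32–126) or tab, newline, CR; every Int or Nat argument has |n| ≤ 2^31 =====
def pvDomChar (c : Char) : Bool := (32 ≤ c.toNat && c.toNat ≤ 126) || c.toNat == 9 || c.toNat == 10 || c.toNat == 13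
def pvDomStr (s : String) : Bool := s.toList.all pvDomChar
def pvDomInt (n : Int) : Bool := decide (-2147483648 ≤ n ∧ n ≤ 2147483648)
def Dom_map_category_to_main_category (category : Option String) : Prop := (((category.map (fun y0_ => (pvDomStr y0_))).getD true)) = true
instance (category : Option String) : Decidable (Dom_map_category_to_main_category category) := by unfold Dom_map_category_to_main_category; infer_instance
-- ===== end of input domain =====

set_option maxRecDepth 20000

-- B replaces A's per-call scan over the nested category_map with a flat precomputed
-- inverted table (subcategory -> main, first occurrence wins) and an explicit None branch.


-- ===== PORT A =====
-- the literal category_map of A (dict → association list in insertion order;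
-- the subcategory lists contain None, hence Option String elements)
def pvCategoryMapA : List (String × List (Option String)) := [
  ("gameplay", [some "gameplay", some "game mode", some "story", some "level design",
    some "multiplayer", some "violence", some "character design",
    some "controls", some "tutorial", some "quality", some "gun play", some "gunplay", some "environment", some "gameplay mechanics",
    some "world",
    some "game environment", some "game design", some "difficulty", some "content", some "cosmetic content", some "in-game content",
    some "options", some "user interface", some "UI", some "interface", some "gameplay", some "game modes", some "gameplay features", some "monetization"]),
  ("price", [some "price"]),
  ("audio_visuals", [some "audio_visuals", some "visuals", some "sounds", some "game environment", some "game design", some "visual", some "sound",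
    some "audio_visuals", some "graphics", some "music", some "soundtrack", some "sound effects", some "audio"]),
  ("performance_bugs", [some "performance_bugs", some "bugs", some "performance", some "saves", some "developers", some "updates", some "anticheat",
    some "update", some "patch", some "bug", some "crash", some "lag", some "performance", some "server", some "servers",
    some "server issues", some "server performance"]),
  ("community", [some "languages", some "reviews", some "community", some "comparison"]),
  ("overall", [some "overall", some "genre", some "platform", some "game"]),
  ("NULL", [some "NULL", some "none", none, some "null", some "", some "noterm"])]

-- the for-loop of A: first pair whose subcategory list contains category wins
def pvLoopA : List (String × List (Option String)) → Option String → String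
  | [], _ => "other"
  | (m, subs) :: rest, c => if subs.contains c then m else pvLoopA rest c

def map_category_to_main_category (category : Option String) : String :=
  pvLoopA pvCategoryMapA category

-- ===== PORT B =====
-- Source B's module-level _SUB_TO_MAIN: a flat string-keyed dict literal (precomputed inverse)
def pvSubToMain : PySem.Dict String String := PySem.Dict.ofList [("gameplay", "gameplay"), ("game mode", "gameplay"), ("story", "gameplay"), ("level design", "gameplay"), ("multiplayer", "gameplay"), ("violence", "gameplay"), ("character design", "gameplay"), ("controls", "gameplay"), ("tutorial", "gameplay"), ("quality", "gameplay"), ("gun play", "gameplay"), ("gunplay", "gameplay"), ("environment", "gameplay"), ("gameplay mechanics", "gameplay"), ("world", "gameplay"), ("game environment", "gameplay"), ("game design", "gameplay"), ("difficulty", "gameplay"), ("content", "gameplay"), ("cosmetic content", "gameplay"), ("in-game content", "gameplay"), ("options", "gameplay"), ("user interface", "gameplay"), ("UI", "gameplay"), ("interface", "gameplay"), ("game modes", "gameplay"), ("gameplay features", "gameplay"), ("monetization", "gameplay"), ("price", "price"), ("audio_visuals", "audio_visuals"), ("visuals", "audio_visuals"), ("sounds", "audio_visuals"), ("visual", "audio_visuals"),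 ("sound", "audio_visuals"), ("graphics", "audio_visuals"), ("music", "audio_visuals"), ("soundtrack", "audio_visuals"), ("sound effects", "audio_visuals"), ("audio", "audio_visuals"), ("performance_bugs", "performance_bugs"), ("bugs", "performance_bugs"), ("performance", "performance_bugs"), ("saves", "performance_bugs"), ("developers", "performance_bugs"), ("updates", "performance_bugs"), ("anticheat", "performance_bugs"), ("update", "performance_bugs"), ("patch", "performance_bugs"), ("bug", "performance_bugs"), ("crash", "performance_bugs"), ("lag", "performance_bugs"), ("server", "performance_bugs"), ("servers", "performance_bugs"), ("server issues", "performance_bugs"), ("server performance", "performance_bugs"), ("languages", "community"), ("reviews", "community"), ("community", "community"), ("comparison", "community"), ("overall", "overall"), ("genre", "overall"), ("platform", "overall"), ("game", "overall"), ("NULL", "NULL"), ("none", "NULL"), ("null", "NULL"), ("", "NULL"), ("noterm", "NULL")]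

-- Source B's body: explicit None branch, then one dict lookup with default 'other'
def map_category_to_main_category_alt (category : Option String) : String :=
  match category with
  | none => "NULL"
  | some s => pvSubToMain.getD s "other"

-- ===== PRECONDITION & SPEC =====
def Spec_map_category_to_main_category (category : Option String) (out : String) : Prop := out = map_category_to_main_category_alt category
instance (category : Option String) (out : String) : Decidable (Spec_map_category_to_main_category category out) := by unfold Spec_map_category_to_main_category; infer_instance

-- ===== CLAIM (what is proved, stated in full; the proofs are below) =====
def Claim_equal_map_category_to_main_category : Prop := ∀ (category : Option String), Dom_map_category_to_main_category category → Spec_map_category_to_main_category category (map_category_to_main_category category)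

-- ===== LEMMAS AND PROOFS =====

-- the distinct string subcategories occurring anywhere in A's map (= B's dict keys)
def pvAllSubs : List String := ["gameplay", "game mode", "story", "level design", "multiplayer", "violence", "character design", "controls", "tutorial", "quality", "gun play", "gunplay", "environment", "gameplay mechanics", "world", "game environment", "game design", "difficulty", "content", "cosmetic content", "in-game content", "options", "user interface", "UI", "interface", "game modes", "gameplay features", "monetization", "price", "audio_visuals", "visuals", "sounds", "visual", "sound", "graphics", "music", "soundtrack", "sound effects", "audio", "performance_bugs", "bugs", "performance", "saves", "developers", "updates", "anticheat", "update", "patch", "bug", "crash", "lag", "server", "servers", "server issues", "server performance", "languages", "reviews", "community", "comparison", "overall", "genre", "platform", "game", "NULL", "none", "null", "", "noterm"]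

lemma pvKeys_eval : pvSubToMain.keys = pvAllSubs := by decide

lemma pv_pos : ∀ t ∈ pvAllSubs, pvLoopA pvCategoryMapA (some t) = pvSubToMain.getD t "other" := by decide

lemma pv_notin_other (s : String) (h : ¬ s ∈ pvAllSubs) :
    map_category_to_main_category (some s) = "other" ∧
    map_category_to_main_category_alt (some s) = "other" := by
  have h' := h
  simp [pvAllSubs, not_or] at h'
  constructor
  · simp [map_category_to_main_category, pvLoopA, pvCategoryMapA, List.contains_eq_mem, h']
  · have hc : pvSubToMain.contains s = false := by
      rw [PySem.Dict.contains_eq_decide_mem_keys, pvKeys_eval]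
      simp [h]
    simp only [map_category_to_main_category_alt]
    rw [PySem.Dict.getD_of_not_contains _ _ hc]

-- ===== VERDICT (by name: the statement is the Claim_ definition above) =====
theorem map_category_to_main_category_spec : Claim_equal_map_category_to_main_category := by
  intro category _
  unfold Spec_map_category_to_main_category
  match category with
  | none => decide
  | some s =>
    by_cases h : s ∈ pvAllSubs
    · simpa [map_category_to_main_category, map_category_to_main_category_alt] using pv_pos s h
    · obtain ⟨ha, hb⟩ := pv_notin_other s h
      rw [ha, hb]
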